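-- pv_equiv track=rewrite | github.com/tomaas-zeman/foobar-challenge | level03/02-doomsday-fuel/solution.py | reorder_matrix
-- ===== SOURCE A (Python) =====
-- def reorder_cols(matrix, column_mapping):
--     result_matrix = [
--         [matrix[row][col] for col in range(len(matrix[0]))]
--         for row in range(len(matrix))
--     ]
--
--     tmp = {}
--
--     for col1, col2 in column_mapping.items():
--         if col2 not in tmp:
--             tmp[col2] = [matrix[row][col2] for row in range(len(matrix))]
--
--         if col1 not in tmp:
--             for row in range(len(matrix)):
--                 result_matrix[row][col2] = matrix[row][col1]
--         else:
--             for row in range(len(matrix)):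
--                 result_matrix[row][col2] = tmp[col1][row]
--
--     return result_matrix
--
-- def create_new_mapping(terminal_rows, transition_rows):
--     new_mapping = {}
--
--     for i in range(len(transition_rows)):
--         new_mapping[transition_rows[i]] = i
--     for i in range(len(terminal_rows)):
--         real_i = i + len(transition_rows)
--         new_mapping[terminal_rows[i]] = real_i
--
--     return new_mapping
--
-- def reorder_rows(matrix, new_mapping):
--     return [
--         matrix[original_row]
--         for original_row, _ in sorted(new_mapping.items(), key=lambda item: item[1])
--     ]
--
-- def reorder_matrix(matrix):
--     terminal_rows = [
--         row for row in range(len(matrix)) if all(col == 0 for col in matrix[row])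
--     ]
--     transition_rows = [
--         row for row in range(len(matrix)) if any(col != 0 for col in matrix[row])
--     ]
--
--     new_mapping = create_new_mapping(terminal_rows, transition_rows)
--     return reorder_cols(reorder_rows(matrix, new_mapping), new_mapping)
-- ===== SOURCE B (Python) =====
-- def reorder_matrix(matrix):
--     # Order: transition rows (any nonzero entry) first, then terminal rows (all zero),
--     # then read the symmetric permutation off directly; columns beyond the n-th of the
--     # (reordered) first-row width are copied unchanged, as A's column pass leaves them.
--     n = len(matrix)
--     order = ([r for r in range(n) if any(c != 0 for c in matrix[r])]
--              + [r for r in range(n) if all(c == 0 for c in matrix[r])])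
--     rows = [matrix[r] for r in order]
--     width = len(rows[0]) if rows else 0
--     return [[row[order[j]] if j < n else row[j] for j in range(width)] for row in rows]
-- ===== Notes on version B (the rewrite author's own statement) =====
-- stated objective: simpler
-- what changed: B replaces A's three helpers (a row-index mapping dict, a stable sort of its items, and a per-column rewrite pass with a cached-column dict) by one 'order' list (transition rows then terminal rows) and a single nested comprehension reading matrix[order[i]][order[j]] (columns beyond the square part copied unchanged).
-- outside the precondition, e.g. on reorder_matrix([[0, 1], [2, 3, 4]]): A returns [[0, 1], [2, 3]], B returns [[0, 1], [2, 3]]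
import Mathlib
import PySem

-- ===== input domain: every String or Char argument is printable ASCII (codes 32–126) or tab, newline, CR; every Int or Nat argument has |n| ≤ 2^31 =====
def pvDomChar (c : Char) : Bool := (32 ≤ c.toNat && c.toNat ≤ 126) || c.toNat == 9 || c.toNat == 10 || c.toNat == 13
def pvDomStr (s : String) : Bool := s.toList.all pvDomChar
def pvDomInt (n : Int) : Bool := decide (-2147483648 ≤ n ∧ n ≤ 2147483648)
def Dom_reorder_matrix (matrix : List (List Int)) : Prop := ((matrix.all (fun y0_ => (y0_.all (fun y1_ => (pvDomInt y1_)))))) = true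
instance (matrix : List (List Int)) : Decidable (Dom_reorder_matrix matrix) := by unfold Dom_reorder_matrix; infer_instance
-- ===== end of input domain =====

-- B replaces A's mapping dict, column cache and three helpers by one `order` list and a
-- double comprehension reading the permuted entries directly (same return value; no mutation).

-- ===== PORT A =====
def reorder_cols (matrix : List (List Int)) (column_mapping : PySem.Dict Int Int) : List (List Int) :=
  let result_matrix : List (List Int) :=
    (PySem.List.pyRange 0 (matrix.length : Int) 1).map (fun row =>
      (PySem.List.pyRange 0 ((PySem.List.pyGetD matrix 0 []).length : Int) 1).map (fun col =>
        PySem.List.pyGetD (PySem.List.pyGetD matrix row []) col 0))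
  (column_mapping.items.foldl (fun (st : List (List Int) × PySem.Dict Int (List Int)) p =>
      let tmp' := if (st.2.get? p.2).isNone
        then st.2.insert p.2 ((PySem.List.pyRange 0 (matrix.length : Int) 1).map (fun row =>
          PySem.List.pyGetD (PySem.List.pyGetD matrix row []) p.2 0))
        else st.2
      if (tmp'.get? p.1).isNone then
        ((PySem.List.pyRange 0 (matrix.length : Int) 1).foldl (fun res row =>
          PySem.List.pySetD res row (PySem.List.pySetD (PySem.List.pyGetD res row [])
            p.2 (PySem.List.pyGetD (PySem.List.pyGetD matrix row []) p.1 0))) st.1, tmp')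
      else
        ((PySem.List.pyRange 0 (matrix.length : Int) 1).foldl (fun res row =>
          PySem.List.pySetD res row (PySem.List.pySetD (PySem.List.pyGetD res row [])
            p.2 (PySem.List.pyGetD ((tmp'.get? p.1).getD []) row 0))) st.1, tmp'))
    (result_matrix, PySem.Dict.empty)).1

def create_new_mapping (terminal_rows transition_rows : List Int) : PySem.Dict Int Int :=
  let m1 := (PySem.List.pyRange 0 (transition_rows.length : Int) 1).foldl
    (fun m i => m.insert (PySem.List.pyGetD transition_rows i 0) i) PySem.Dict.empty
  (PySem.List.pyRange 0 (terminal_rows.length : Int) 1).foldl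
    (fun m i => m.insert (PySem.List.pyGetD terminal_rows i 0) (i + (transition_rows.length : Int))) m1

def reorder_rows (matrix : List (List Int)) (new_mapping : PySem.Dict Int Int) : List (List Int) :=
  (PySem.List.sorted new_mapping.items (fun item => item.2) false).map
    (fun p => PySem.List.pyGetD matrix p.1 [])

def reorder_matrix (matrix : List (List Int)) : List (List Int) :=
  let terminal_rows := (PySem.List.pyRange 0 (matrix.length : Int) 1).filter
    (fun row => (PySem.List.pyGetD matrix row []).all (fun col => col == 0))
  let transition_rows := (PySem.List.pyRange 0 (matrix.length : Int) 1).filter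
    (fun row => (PySem.List.pyGetD matrix row []).any (fun col => col != 0))
  let new_mapping := create_new_mapping terminal_rows transition_rows
  reorder_cols (reorder_rows matrix new_mapping) new_mapping

-- ===== PORT B =====
def reorder_matrix_alt (matrix : List (List Int)) : List (List Int) :=
  let n : Int := (matrix.length : Int)
  let order : List Int :=
    (PySem.List.pyRange 0 n 1).filter
      (fun r => (PySem.List.pyGetD matrix r []).any (fun c => c != 0))
    ++ (PySem.List.pyRange 0 n 1).filter
      (fun r => (PySem.List.pyGetD matrix r []).all (fun c => c == 0))
  let rows : List (List Int) := order.map (fun r => PySem.List.pyGetD matrix r [])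
  let width : Int := if rows = [] then 0 else ((rows.headD []).length : Int)
  rows.map (fun row =>
    (PySem.List.pyRange 0 width 1).map (fun j =>
      if j < n then PySem.List.pyGetD row (PySem.List.pyGetD order j 0) 0
      else PySem.List.pyGetD row j 0))

-- ===== PRECONDITION & SPEC =====
-- Pre_ excludes the inputs on which A raises IndexError (a row shorter than the width used,
-- or more rows than columns), and additionally — stated narrowing — requires all rows to share
-- one width (the natural matrix shape): A also returns on some ragged inputs whose rows are all
-- at least as long as the first nonzero row, truncating to that width.
def Pre_reorder_matrix (matrix : List (List Int)) : Prop :=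
  (∀ row ∈ matrix, row.length = (matrix.headD []).length) ∧
    matrix.length ≤ (matrix.headD []).length
instance (matrix : List (List Int)) : Decidable (Pre_reorder_matrix matrix) := by
  unfold Pre_reorder_matrix; infer_instance

def pvWitness_reorder_matrix : List (List Int) := [[0, 0, 7], [1, 2, 3], [0, 0, 0]]

def Spec_reorder_matrix (matrix : List (List Int)) (out : List (List Int)) : Prop := out = reorder_matrix_alt matrix
instance (matrix : List (List Int)) (out : List (List Int)) : Decidable (Spec_reorder_matrix matrix out) := by unfold Spec_reorder_matrix; infer_instance

-- ===== CLAIM (what is proved, stated in full; the proofs are below) =====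
def Claim_equal_reorder_matrix : Prop := ∀ (matrix : List (List Int)), Dom_reorder_matrix matrix → Pre_reorder_matrix matrix → Spec_reorder_matrix matrix (reorder_matrix matrix)

-- ===== LEMMAS AND PROOFS =====

theorem pv_dict_build (xs : List Int) : ∀ (s t : Int) (d : PySem.Dict Int Int),
    xs.Nodup → (∀ x ∈ xs, d.contains x = false) →
    ((PySem.List.enumerate xs s).foldl (fun m p => m.insert p.2 (p.1 + t)) d).items
      = d.items ++ (PySem.List.enumerate xs (s + t)).map (fun p => (p.2, p.1)) := by
  induction xs with
  | nil => intro s t d _ _; simp [PySem.List.enumerate_nil]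
  | cons x rest ih =>
    intro s t d hnd hcont
    rw [PySem.List.enumerate_cons, PySem.List.enumerate_cons]
    simp only [List.foldl_cons, List.map_cons]
    have hx : d.contains x = false := hcont x (by simp)
    have hins : (d.insert x (s + t)).items = d.items ++ [(x, s + t)] := by
      simp [PySem.Dict.insert, hx]
    rw [ih (s+1) t (d.insert x (s+t)) hnd.of_cons ?_]
    · rw [hins]; simp; ring_nf
    · intro y hy
      have hyx : y ≠ x := by
        intro h; exact (List.nodup_cons.mp hnd).1 (h ▸ hy)
      simp [PySem.Dict.contains, hins, List.any_append]
      constructor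
      · have := hcont y (by simp [hy]); simpa [PySem.Dict.contains] using this
      · exact fun h => hyx h.symm

theorem pv_rowloop {α : Type} (f : Int → α → α) (dflt : α) :
    ∀ (cur pre : List α),
    (PySem.List.pyRange (pre.length : Int) ((pre.length : Int) + (cur.length : Int)) 1).foldl
        (fun res row => PySem.List.pySetD res row (f row (PySem.List.pyGetD res row dflt))) (pre ++ cur)
      = pre ++ (PySem.List.enumerate cur (pre.length : Int)).map (fun p => f p.1 p.2) := by
  intro cur
  induction cur with
  | nil => intro pre; simp [PySem.List.pyRange_one_eq_nil, PySem.List.enumerate_nil]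
  | cons x rest ih =>
    intro pre
    rw [PySem.List.pyRange_one_cons (by push_cast [List.length_cons]; omega), List.foldl_cons]
    have hget : PySem.List.pyGetD (pre ++ x :: rest) (pre.length : Int) dflt = x := by
      rw [PySem.List.pyGetD_natCast]
      simp [List.getD]
    have hset : PySem.List.pySetD (pre ++ x :: rest) (pre.length : Int) (f (pre.length : Int) x)
        = (pre ++ [f (pre.length : Int) x]) ++ rest := by
      rw [PySem.List.pySetD_natCast]
      rw [List.set_append_right _ _ (le_refl _)]
      simp
    rw [hget, hset]
    rw [show (pre.length : Int) + ((x :: rest).length : Int)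
          = (pre.length : Int) + 1 + (rest.length : Int) by push_cast [List.length_cons]; ring]
    have hlen : ((pre ++ [f (pre.length : Int) x]).length : Int) = (pre.length : Int) + 1 := by simp
    have this2 := ih (pre ++ [f (pre.length : Int) x])
    rw [hlen] at this2
    rw [this2, PySem.List.enumerate_cons]
    simp

theorem pv_enum_map_range {α β : Type} (m : Nat) (h : Nat → α) (F : Int × α → β) :
    (PySem.List.enumerate ((List.range m).map h) 0).map F
      = (List.range m).map (fun k : Nat => F ((k : Int), h k)) := by
  apply List.ext_getElem
  · simp [PySem.List.length_enumerate]
  · intro i h1 h2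
    simp [PySem.List.getElem_enumerate]

def pvRow (M : List (List Int)) (L : Nat) (g : Int → Int) (i : Int) : List Int :=
  (PySem.List.pyRange 0 (L : Int) 1).map (fun j => PySem.List.pyGetD (PySem.List.pyGetD M i []) (g j) 0)

def pvMat (M : List (List Int)) (L : Nat) (g : Int → Int) : List (List Int) :=
  (List.range M.length).map (fun i : Nat => pvRow M L g (i : Int))

theorem pv_setD_row (M : List (List Int)) (L : Nat) (g : Int → Int) (i c c1 : Int)
    (h0 : 0 ≤ c) :
    PySem.List.pySetD (pvRow M L g i) c (PySem.List.pyGetD (PySem.List.pyGetD M i []) c1 0)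
      = pvRow M L (fun j => if j = c then c1 else g j) i := by
  unfold pvRow
  rw [PySem.List.pySetD_of_nonneg _ _ h0]
  rw [PySem.List.pyRange_zero_nat]
  apply List.ext_getElem
  · simp
  · intro k hk1 hk2
    simp only [List.map_map, List.getElem_set, List.getElem_map, List.getElem_range,
      Function.comp_apply] at *
    by_cases hkc : c.toNat = k
    · rw [if_pos hkc, if_pos (show (k : Int) = c by omega)]
    · rw [if_neg hkc, if_neg (show ¬ (k : Int) = c by omega)]

theorem pv_gstar (order : List Int) : ∀ (s : Int) (g : Int → Int) (j : Int),
    (((PySem.List.enumerate order s).map (fun p => (p.2, p.1))).foldl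
        (fun g p => fun j => if j = p.2 then p.1 else g j) g) j
      = if s ≤ j ∧ j < s + (order.length : Int) then PySem.List.pyGetD order (j - s) 0 else g j := by
  induction order with
  | nil => intro s g j; simp [PySem.List.enumerate_nil]
  | cons x rest ih =>
    intro s g j
    rw [PySem.List.enumerate_cons]
    simp only [List.map_cons, List.foldl_cons]
    rw [ih]
    by_cases h1 : s + 1 ≤ j ∧ j < s + 1 + (rest.length : Int)
    · rw [if_pos h1, if_pos (by push_cast [List.length_cons]; omega)]
      rw [show j - s = (((j - s - 1).toNat + 1 : Nat) : Int) by push_cast; omega]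
      rw [show j - (s + 1) = (((j - s - 1).toNat : Nat) : Int) by omega]
      rw [PySem.List.pyGetD_natCast, PySem.List.pyGetD_natCast]
      simp
    · rw [if_neg h1]
      by_cases h2 : j = s
      · rw [if_pos h2, if_pos (by push_cast [List.length_cons]; omega)]
        subst h2
        simp [PySem.List.pyGetD_zero_cons]
      · rw [if_neg h2, if_neg (by push_cast [List.length_cons]; omega)]

theorem pv_rowloop0 {α : Type} (f : Int → α → α) (dflt : α) (cur : List α) :
    (PySem.List.pyRange 0 ((cur.length : Int)) 1).foldl
        (fun res row => PySem.List.pySetD res row (f row (PySem.List.pyGetD res row dflt))) cur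
      = (PySem.List.enumerate cur 0).map (fun p => f p.1 p.2) := by
  have h := pv_rowloop f dflt cur []
  simpa using h

theorem pv_branch_fold (M : List (List Int)) (L : Nat) (g : Int → Int) (c1 c2 : Int)
    (h0 : 0 ≤ c2) (V : Int → Int)
    (hV : ∀ k : Nat, k < M.length →
      V (k : Int) = PySem.List.pyGetD (PySem.List.pyGetD M (k : Int) []) c1 0) :
    (PySem.List.pyRange 0 (M.length : Int) 1).foldl
        (fun res row => PySem.List.pySetD res row
          (PySem.List.pySetD (PySem.List.pyGetD res row []) c2 (V row))) (pvMat M L g)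
      = pvMat M L (fun j => if j = c2 then c1 else g j) := by
  rw [show ((M.length : Int)) = ((pvMat M L g).length : Int) by simp [pvMat]]
  rw [pv_rowloop0 (fun row r => PySem.List.pySetD r c2 (V row)) [] (pvMat M L g)]
  unfold pvMat
  rw [pv_enum_map_range]
  apply List.map_congr_left
  intro k hk
  simp only [List.mem_range] at hk
  rw [hV k hk]
  exact pv_setD_row M L g _ c2 c1 h0

def pvStep (M : List (List Int)) (st : List (List Int) × PySem.Dict Int (List Int))
    (p : Int × Int) : List (List Int) × PySem.Dict Int (List Int) :=
  let tmp' := if (st.2.get? p.2).isNone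
    then st.2.insert p.2 ((PySem.List.pyRange 0 (M.length : Int) 1).map (fun row =>
      PySem.List.pyGetD (PySem.List.pyGetD M row []) p.2 0))
    else st.2
  if (tmp'.get? p.1).isNone then
    ((PySem.List.pyRange 0 (M.length : Int) 1).foldl (fun res row =>
      PySem.List.pySetD res row (PySem.List.pySetD (PySem.List.pyGetD res row [])
        p.2 (PySem.List.pyGetD (PySem.List.pyGetD M row []) p.1 0))) st.1, tmp')
  else
    ((PySem.List.pyRange 0 (M.length : Int) 1).foldl (fun res row =>
      PySem.List.pySetD res row (PySem.List.pySetD (PySem.List.pyGetD res row [])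
        p.2 (PySem.List.pyGetD ((tmp'.get? p.1).getD []) row 0))) st.1, tmp')

theorem pv_colsloop (M : List (List Int)) (L : Nat) :
    ∀ (ps : List (Int × Int)) (g : Int → Int) (tmp : PySem.Dict Int (List Int)),
    (∀ p ∈ ps, 0 ≤ p.2 ∧ p.2 < (L : Int)) →
    (∀ (k : Int) (v : List Int), tmp.get? k = some v →
      v = (PySem.List.pyRange 0 (M.length : Int) 1).map (fun row =>
            PySem.List.pyGetD (PySem.List.pyGetD M row []) k 0)) →
    (ps.foldl (pvStep M) (pvMat M L g, tmp)).1
      = pvMat M L (ps.foldl (fun g p => fun j => if j = p.2 then p.1 else g j) g) := by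
  intro ps
  induction ps with
  | nil => intro g tmp _ _; simp
  | cons p rest ih =>
    intro g tmp hps htmp
    obtain ⟨hp0, hpL⟩ := hps p (List.mem_cons_self ..)
    simp only [List.foldl_cons]
    set tmp' := if (tmp.get? p.2).isNone
        then tmp.insert p.2 ((PySem.List.pyRange 0 (M.length : Int) 1).map (fun row =>
          PySem.List.pyGetD (PySem.List.pyGetD M row []) p.2 0))
        else tmp with htmp'def
    have htmp'inv : ∀ (k : Int) (v : List Int), tmp'.get? k = some v →
        v = (PySem.List.pyRange 0 (M.length : Int) 1).map (fun row =>
              PySem.List.pyGetD (PySem.List.pyGetD M row []) k 0) := by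
      intro k v hkv
      rw [htmp'def] at hkv
      by_cases hnone : (tmp.get? p.2).isNone
      · rw [if_pos hnone] at hkv
        by_cases hk : k = p.2
        · subst hk
          rw [PySem.Dict.get?_insert_self] at hkv
          exact (Option.some_inj.mp hkv).symm
        · rw [PySem.Dict.get?_insert_of_ne _ _ hk] at hkv
          exact htmp k v hkv
      · rw [if_neg hnone] at hkv
        exact htmp k v hkv
    have hbr1 : (PySem.List.pyRange 0 (M.length : Int) 1).foldl (fun res row =>
          PySem.List.pySetD res row (PySem.List.pySetD (PySem.List.pyGetD res row [])
            p.2 (PySem.List.pyGetD (PySem.List.pyGetD M row []) p.1 0))) (pvMat M L g)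
        = pvMat M L (fun j => if j = p.2 then p.1 else g j) :=
      pv_branch_fold M L g p.1 p.2 hp0 _ (fun k hk => rfl)
    have hbr2 : ¬ (tmp'.get? p.1).isNone →
        (PySem.List.pyRange 0 (M.length : Int) 1).foldl (fun res row =>
          PySem.List.pySetD res row (PySem.List.pySetD (PySem.List.pyGetD res row [])
            p.2 (PySem.List.pyGetD ((tmp'.get? p.1).getD []) row 0))) (pvMat M L g)
        = pvMat M L (fun j => if j = p.2 then p.1 else g j) := by
      intro hc
      obtain ⟨v, hv⟩ : ∃ v, tmp'.get? p.1 = some v := by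
        cases h : tmp'.get? p.1 with
        | none => rw [h] at hc; simp at hc
        | some v => exact ⟨v, rfl⟩
      apply pv_branch_fold M L g p.1 p.2 hp0
      intro k hk
      rw [hv]
      simp only [Option.getD_some]
      rw [htmp'inv p.1 v hv]
      rw [PySem.List.pyGetD_map_pyRange _ M.length k 0 hk]
    have hstep : pvStep M (pvMat M L g, tmp) p
        = (pvMat M L (fun j => if j = p.2 then p.1 else g j), tmp') := by
      unfold pvStep
      dsimp only
      rw [← htmp'def]
      by_cases hc : (tmp'.get? p.1).isNone
      · rw [if_pos hc, hbr1]
      · rw [if_neg hc, hbr2 hc]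
    rw [hstep]
    exact ih _ tmp' (fun q hq => hps q (List.mem_cons_of_mem _ hq)) htmp'inv

theorem pv_reorder_cols_eq (M : List (List Int)) (d : PySem.Dict Int Int) :
    reorder_cols M d = (d.items.foldl (pvStep M)
      ((PySem.List.pyRange 0 (M.length : Int) 1).map (fun row =>
        (PySem.List.pyRange 0 ((PySem.List.pyGetD M 0 []).length : Int) 1).map (fun col =>
          PySem.List.pyGetD (PySem.List.pyGetD M row []) col 0)), PySem.Dict.empty)).1 := rfl

theorem pv_cnm_items (term trans : List Int) (htr : trans.Nodup) (hte : term.Nodup)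
    (hdisj : ∀ x ∈ term, x ∉ trans) :
    (create_new_mapping term trans).items
      = (PySem.List.enumerate (trans ++ term) 0).map (fun p => (p.2, p.1)) := by
  unfold create_new_mapping
  have conv1 : ∀ (d : PySem.Dict Int Int),
      (PySem.List.pyRange 0 (trans.length : Int) 1).foldl
        (fun m i => m.insert (PySem.List.pyGetD trans i 0) i) d
      = (PySem.List.enumerate trans 0).foldl (fun m p => m.insert p.2 (p.1 + 0)) d := by
    intro d
    rw [show (PySem.List.enumerate trans 0)
        = (PySem.List.pyRange 0 (trans.length : Int) 1).map (fun j => (j, PySem.List.pyGetD trans j 0))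
      from by rw [PySem.List.enumerate_eq_map_pyRange trans 0, PySem.List.len_eq]]
    rw [List.foldl_map]
    simp
  have conv2 : ∀ (d : PySem.Dict Int Int),
      (PySem.List.pyRange 0 (term.length : Int) 1).foldl
        (fun m i => m.insert (PySem.List.pyGetD term i 0) (i + (trans.length : Int))) d
      = (PySem.List.enumerate term 0).foldl (fun m p => m.insert p.2 (p.1 + (trans.length : Int))) d := by
    intro d
    rw [show (PySem.List.enumerate term 0)
        = (PySem.List.pyRange 0 (term.length : Int) 1).map (fun j => (j, PySem.List.pyGetD term j 0))
      from by rw [PySem.List.enumerate_eq_map_pyRange term 0, PySem.List.len_eq]]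
    rw [List.foldl_map]
  rw [conv1, conv2]
  have h1 := pv_dict_build trans 0 0 PySem.Dict.empty htr (fun x _ => rfl)
  have h1items : ((PySem.List.enumerate trans 0).foldl
      (fun m p => m.insert p.2 (p.1 + 0)) PySem.Dict.empty).items
      = (PySem.List.enumerate trans 0).map (fun p => (p.2, p.1)) := by
    rw [h1]; simp [PySem.Dict.empty]
  have hcont : ∀ x ∈ term, ((PySem.List.enumerate trans 0).foldl
      (fun m p => m.insert p.2 (p.1 + 0)) PySem.Dict.empty).contains x = false := by
    intro x hx
    rw [PySem.Dict.contains, h1items]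
    rw [List.any_eq_false]
    intro q hq
    simp only [List.mem_map] at hq
    obtain ⟨p, hp, rfl⟩ := hq
    rw [PySem.List.mem_enumerate_iff] at hp
    obtain ⟨k, hk, rfl⟩ := hp
    simp only [beq_iff_eq]
    intro hEq
    exact hdisj x hx (hEq ▸ List.getElem_mem hk)
  have h2 := pv_dict_build term 0 (trans.length : Int)
      ((PySem.List.enumerate trans 0).foldl (fun m p => m.insert p.2 (p.1 + 0)) PySem.Dict.empty)
      hte hcont
  rw [h2, h1items, PySem.List.enumerate_append]
  simp

theorem pv_any_ne_zero (l : List Int) :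
    (l.any (fun c => c != 0)) = !(l.all (fun c => c == 0)) := by
  induction l with
  | nil => simp
  | cons c cs ih =>
    simp only [bne] at ih ⊢
    simp [ih]

theorem pv_map_swap_fst {α β : Type} (xs : List α) (s : Int) (f : α → β) :
    ((PySem.List.enumerate xs s).map (fun p => (p.2, p.1))).map (fun q => f q.1) = xs.map f := by
  rw [List.map_map]
  rw [show ((fun q : α × Int => f q.1) ∘ (fun p : Int × α => (p.2, p.1)))
      = (f ∘ (fun p : Int × α => p.2)) from rfl]
  rw [← List.map_map, PySem.List.map_snd_enumerate]

theorem pv_result0 (R : List (List Int)) :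
    (PySem.List.pyRange 0 (R.length : Int) 1).map (fun row =>
      (PySem.List.pyRange 0 ((PySem.List.pyGetD R 0 []).length : Int) 1).map (fun col =>
        PySem.List.pyGetD (PySem.List.pyGetD R row []) col 0))
      = pvMat R ((PySem.List.pyGetD R 0 []).length) (fun j => j) := by
  unfold pvMat pvRow
  rw [PySem.List.pyRange_zero_nat R.length, List.map_map]
  rfl

-- ===== VERDICT (by name: the statement is the Claim_ definition above) =====
theorem reorder_matrix_spec : Claim_equal_reorder_matrix := by
  intro matrix _ hpre
  obtain ⟨hrw, hnW⟩ := hpre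
  unfold Spec_reorder_matrix reorder_matrix reorder_matrix_alt
  dsimp only
  -- names
  set n := matrix.length with hn
  set W := (matrix.headD []).length with hW
  set pAll := fun (row : Int) => (PySem.List.pyGetD matrix row []).all (fun col => col == 0) with hpAll
  set pAny := fun (row : Int) => (PySem.List.pyGetD matrix row []).any (fun col => col != 0) with hpAny
  set term := (PySem.List.pyRange 0 (n : Int) 1).filter pAll with hterm
  set trans := (PySem.List.pyRange 0 (n : Int) 1).filter pAny with htrans
  set order := trans ++ term with horder
  -- complementarity of the two predicates
  have hcompl : ∀ x, pAny x = !(pAll x) := by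
    intro x
    rw [hpAll, hpAny]
    exact pv_any_ne_zero _
  have htermnot : term = (PySem.List.pyRange 0 (n : Int) 1).filter (fun x => !(pAny x)) := by
    rw [hterm]
    apply List.filter_congr
    intro x _
    rw [hcompl]; simp
  have hperm : order.Perm (PySem.List.pyRange 0 (n : Int) 1) := by
    rw [horder, htermnot]
    exact List.filter_append_perm pAny _
  have hlen_order : order.length = n := by
    rw [hperm.length_eq, PySem.List.length_pyRange_one]; omega
  have hnodup_order : order.Nodup := hperm.nodup_iff.mpr (PySem.List.nodup_pyRange_one 0 (n : Int))
  have hmem_order : ∀ x ∈ order, 0 ≤ x ∧ x < (n : Int) := by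
    intro x hx
    have := hperm.mem_iff.mp hx
    rw [PySem.List.mem_pyRange_one] at this
    exact this
  -- mapping items
  have hdisj : ∀ x ∈ term, x ∉ trans := by
    intro x hxt hxtr
    rw [hterm] at hxt; rw [htrans] at hxtr
    have h1 := (List.mem_filter.mp hxt).2
    have h2 := (List.mem_filter.mp hxtr).2
    rw [hcompl x, h1] at h2
    simp at h2
  have hitems : (create_new_mapping term trans).items
      = (PySem.List.enumerate order 0).map (fun p => (p.2, p.1)) := by
    rw [horder]
    exact pv_cnm_items term trans
      ((PySem.List.nodup_pyRange_one 0 (n : Int)).filter _)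
      ((PySem.List.nodup_pyRange_one 0 (n : Int)).filter _) hdisj
  -- reorder_rows: the sorted items are already sorted
  have hpair : (create_new_mapping term trans).items.Pairwise (fun a b => a.2 ≤ b.2) := by
    rw [hitems]
    rw [List.pairwise_map]
    exact (PySem.List.pairwise_lt_enumerate order 0).imp (fun h => le_of_lt h)
  have hsorted : PySem.List.sorted (create_new_mapping term trans).items (fun item => item.2) false
      = (create_new_mapping term trans).items := PySem.List.sorted_eq_self_of_pairwise _ _ hpair
  have hrows : reorder_rows matrix (create_new_mapping term trans)
      = order.map (fun r => PySem.List.pyGetD matrix r []) := by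
    unfold reorder_rows
    rw [hsorted, hitems]
    exact pv_map_swap_fst order 0 (fun r => PySem.List.pyGetD matrix r [])
  set R := order.map (fun r => PySem.List.pyGetD matrix r []) with hR
  set L := (PySem.List.pyGetD R 0 []).length with hL
  have hRlen : R.length = n := by rw [hR, List.length_map, hlen_order]
  have hRmem : ∀ r ∈ R, r.length = W := by
    intro r hr
    rw [hR] at hr
    obtain ⟨o, ho, rfl⟩ := List.mem_map.mp hr
    obtain ⟨h0, h1⟩ := hmem_order o ho
    rw [PySem.List.pyGetD_eq_getElem matrix [] h0 (by omega)]
    exact hrw _ (List.getElem_mem _)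
  have hnL : n ≤ L := by
    rcases Nat.eq_zero_or_pos n with h0 | hpos
    · omega
    · have hRne : R ≠ [] := by
        intro hnil; rw [hnil] at hRlen; simp at hRlen; omega
      obtain ⟨a, t, hRc⟩ := List.exists_cons_of_ne_nil hRne
      rw [hL, hRc, PySem.List.pyGetD_zero]
      simp only [List.getD_cons_zero]
      rw [hRmem a (by rw [hRc]; exact List.mem_cons_self ..)]
      exact hnW
  -- A side: the cols loop
  have hitems2 : ∀ p ∈ (create_new_mapping term trans).items, 0 ≤ p.2 ∧ p.2 < (L : Int) := by
    intro p hp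
    rw [hitems] at hp
    obtain ⟨q, hq, rfl⟩ := List.mem_map.mp hp
    rw [PySem.List.mem_enumerate_iff] at hq
    obtain ⟨k, hk, rfl⟩ := hq
    dsimp only
    constructor
    · omega
    · rw [hlen_order] at hk; omega
  have hempty : ∀ (k : Int) (v : List Int),
      (PySem.Dict.empty : PySem.Dict Int (List Int)).get? k = some v →
      v = (PySem.List.pyRange 0 (R.length : Int) 1).map (fun row =>
            PySem.List.pyGetD (PySem.List.pyGetD R row []) k 0) := by
    intro k v hkv
    simp [PySem.Dict.get?, PySem.Dict.empty] at hkv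
  have hA : reorder_cols R (create_new_mapping term trans)
      = pvMat R L ((create_new_mapping term trans).items.foldl
          (fun g p => fun j => if j = p.2 then p.1 else g j) (fun j => j)) := by
    rw [pv_reorder_cols_eq, pv_result0, ← hL]
    exact pv_colsloop R L (create_new_mapping term trans).items (fun j => j)
      PySem.Dict.empty hitems2 hempty
  rw [hrows, hA, hitems]
  -- B side
  have hwidth : (if R = [] then 0 else ((R.headD []).length : Int)) = (L : Int) := by
    by_cases hRe : R = []
    · have hL0 : L = 0 := by rw [hL, hRe, PySem.List.pyGetD_zero]; rfl
      rw [if_pos hRe, hL0]; rfl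
    · obtain ⟨a, t, hRc⟩ := List.exists_cons_of_ne_nil hRe
      rw [if_neg hRe, hL, hRc, PySem.List.pyGetD_zero]
      rfl
  rw [hwidth]
  -- final extensional comparison
  unfold pvMat pvRow
  apply List.ext_getElem
  · simp
  · intro i hi1 hi2
    simp only [List.getElem_map, List.getElem_range]
    apply List.ext_getElem
    · simp
    · intro k hk1 hk2
      simp only [List.getElem_map]
      rw [PySem.List.getElem_pyRange_one]
      rw [pv_gstar order 0 (fun j => j) (0 + (k : Int))]
      simp only [zero_add, sub_zero]
      have hi2' : i < R.length := by simpa using hi2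
      have hiR : PySem.List.pyGetD R (i : Int) [] = R[i]'hi2' := by
        rw [PySem.List.pyGetD_eq_getElem R [] (by omega) (by exact_mod_cast hi2')]
        simp
      rw [hiR]
      by_cases hkn : (k : Int) < (n : Int)
      · rw [if_pos ⟨by omega, by rw [hlen_order]; exact hkn⟩, if_pos hkn]
      · rw [if_neg (by rw [hlen_order]; omega), if_neg hkn]
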